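-- pv_equiv track=rewrite | github.com/martijnbentum/sshoc | score_sentiment.py | get_next_response_index
-- ===== SOURCE A (Python) =====
-- def get_next_response_index(responses,index,overwrite):
-- 	'''selects the next response to be rated.'''
-- 	if index == len(responses): return None
-- 	response = response_line_to_dict(responses[index])
-- 	if not overwrite:
-- 		if response['rating']:
-- 			return get_next_response_index(responses,index+1,overwrite)
-- 		else: return index
-- 	if overwrite: return index
--
-- def response_line_to_dict(response_line):
-- 	'''creates a dict based on a line in the sentiment_responses file.
-- 	contains answer to be rated, question and possbile rating (if the file was rated by same rater)
-- 	'''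
-- 	column_names = 'id,answer,question,question_number,rating'.split(',')
-- 	l = response_line.split('\t')
-- 	d = {}
-- 	for i,name in enumerate(column_names):
-- 		if i < len(l):d[name] = l[i]
-- 		else: d[name] = ''
-- 	return d
-- ===== SOURCE B (Python) =====
-- def get_next_response_index(responses, index, overwrite):
--     '''selects the next response to be rated.'''
--     n = len(responses)
--     while index != n:
--         if overwrite:
--             return index
--         fields = responses[index].split('\t')
--         if len(fields) <= 4 or fields[4] == '':
--             return index
--         index += 1
--     return None
-- ===== Notes on version B (the rewrite author's own statement) =====
-- stated objective: simpler
-- what changed: A's tail recursion that builds a 5-key dict per line is replaced by a single while loop that reads only the 5th tab field of each line, with no dict and no recursion.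
import Mathlib
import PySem

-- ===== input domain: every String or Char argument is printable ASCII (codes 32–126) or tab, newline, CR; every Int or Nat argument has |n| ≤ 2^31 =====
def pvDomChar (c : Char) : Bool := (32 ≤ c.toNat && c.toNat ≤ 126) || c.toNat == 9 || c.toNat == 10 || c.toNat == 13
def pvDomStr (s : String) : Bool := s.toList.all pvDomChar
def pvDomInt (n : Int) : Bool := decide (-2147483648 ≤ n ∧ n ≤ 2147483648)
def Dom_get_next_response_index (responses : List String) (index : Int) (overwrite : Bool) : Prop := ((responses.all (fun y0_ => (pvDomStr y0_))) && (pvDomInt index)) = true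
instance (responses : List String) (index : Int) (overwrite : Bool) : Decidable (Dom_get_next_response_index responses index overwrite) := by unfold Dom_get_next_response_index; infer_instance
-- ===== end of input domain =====

-- B replaces A's recursion-with-dict-building by a direct forward loop that reads only the
-- 5th tab field of each line, skipping the dict construction entirely (objective: simpler).

-- ===== PORT A =====
-- s.split('\t'): the separator is a nonempty literal, so PySem.Str.split? is always `some`; .getD [] is exact.
def pySplitTab (s : String) : List String := (PySem.Str.split? s "\t").getD []

def response_line_to_dict (response_line : String) : PySem.Dict String String :=
  let column_names := (PySem.Str.split? "id,answer,question,question_number,rating" ",").getD []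
  let l := pySplitTab response_line
  (PySem.List.enumerate column_names 0).foldl
    (fun d p =>
      if p.1 < (l.length : Int) then d.insert p.2 ((PySem.List.pyGet? l p.1).getD "")
      else d.insert p.2 "")
    { items := [] }

-- pyGet? = some means the (possibly negative, wrapped) Python index was in range, so index < length;
-- this is the termination argument of both ports, so it stays above them
lemma pyGet?_some_lt {α : Type} (xs : List α) (i : Int) (a : α)
    (h : PySem.List.pyGet? xs i = some a) : i < (xs.length : Int) := by
  by_contra hlt
  push_neg at hlt
  simp only [PySem.List.pyGet?, PySem.List.pyIdx?] at h
  split_ifs at h with h1 h2 h3 <;> simp_all <;> omega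

def get_next_response_index (responses : List String) (index : Int) (overwrite : Bool) : Option Int :=
  if index = (responses.length : Int) then none
  else
    match h : PySem.List.pyGet? responses index with
    | none => none  -- IndexError in Python; excluded by Pre_
    | some line =>
      let response := response_line_to_dict line
      if !overwrite then
        if PySem.Dict.getD response "rating" "" ≠ "" then
          get_next_response_index responses (index + 1) overwrite
        else some index
      else some index
termination_by ((responses.length : Int) + 1 - index).toNat
decreasing_by
  have := pyGet?_some_lt responses index line h
  omega

-- ===== PORT B =====
def get_next_response_index_alt (responses : List String) (index : Int) (overwrite : Bool) : Option Int :=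
  if index = (responses.length : Int) then none
  else if overwrite then some index
  else
    let fields := pySplitTab ((PySem.List.pyGet? responses index).getD "")
    if fields.length ≤ 4 || ((PySem.List.pyGet? fields 4).getD "" == "") then some index
    else get_next_response_index_alt responses (index + 1) overwrite
termination_by ((responses.length : Int) + 1 - index).toNat
decreasing_by
  rename_i hne hbig
  rcases hget : PySem.List.pyGet? responses index with _ | line
  · exfalso
    apply hbig
    simp only [fields]
    simp only [hget]
    decide
  · have := pyGet?_some_lt _ _ _ hget
    omega

-- ===== PRECONDITION & SPEC =====
-- Pre_ excludes exactly the inputs on which A raises IndexError: index past the list in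
-- either direction (Python wraps negative indices down to -len(responses)).
def Pre_get_next_response_index (responses : List String) (index : Int) (overwrite : Bool) : Prop :=
  -(responses.length : Int) ≤ index ∧ index ≤ (responses.length : Int)
instance (responses : List String) (index : Int) (overwrite : Bool) : Decidable (Pre_get_next_response_index responses index overwrite) := by unfold Pre_get_next_response_index; infer_instance

def pvWitness_get_next_response_index : List String × Int × Bool := (["1\ta\tq\t0\t5", "2\tb\tq\t1\t"], 0, false)

def Spec_get_next_response_index (responses : List String) (index : Int) (overwrite : Bool) (out : Option Int) : Prop := out = get_next_response_index_alt responses index overwrite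
instance (responses : List String) (index : Int) (overwrite : Bool) (out : Option Int) : Decidable (Spec_get_next_response_index responses index overwrite out) := by unfold Spec_get_next_response_index; infer_instance

-- ===== CLAIM (what is proved, stated in full; the proofs are below) =====
def Claim_equal_get_next_response_index : Prop := ∀ (responses : List String) (index : Int) (overwrite : Bool), Dom_get_next_response_index responses index overwrite → Pre_get_next_response_index responses index overwrite → Spec_get_next_response_index responses index overwrite (get_next_response_index responses index overwrite)

-- ===== LEMMAS AND PROOFS =====

lemma alt_unfold (responses : List String) (index : Int) (overwrite : Bool) :
    get_next_response_index_alt responses index overwrite =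
    (if index = (responses.length : Int) then none
     else if overwrite then some index
     else
       let fields := pySplitTab ((PySem.List.pyGet? responses index).getD "")
       if fields.length ≤ 4 || ((PySem.List.pyGet? fields 4).getD "" == "") then some index
       else get_next_response_index_alt responses (index + 1) overwrite) := by
  rw [get_next_response_index_alt]

lemma pyGet4_none (xs : List String) (h : ¬ ((4:Int) < (xs.length : Int))) :
    PySem.List.pyGet? xs 4 = none := by
  simp only [PySem.List.pyGet?, PySem.List.pyIdx?]
  rw [if_pos (by norm_num), if_neg (by omega)]
  rfl

-- A's d['rating'] is exactly the 5th tab field of the line, '' if the line is shorter.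
lemma rating_eq (line : String) :
    PySem.Dict.getD (response_line_to_dict line) "rating" "" =
      (PySem.List.pyGet? (pySplitTab line) 4).getD "" := by
  have hcols : (PySem.Str.split? "id,answer,question,question_number,rating" ",").getD [] =
      ["id", "answer", "question", "question_number", "rating"] := by decide
  unfold response_line_to_dict
  rw [hcols]
  generalize pySplitTab line = l
  simp only [PySem.List.enumerate, List.foldl, apply_ite (fun d : PySem.Dict String String =>
    PySem.Dict.getD d "rating" "")]
  have hins : ∀ (d : PySem.Dict String String) (k v dflt : String),
      PySem.Dict.getD (d.insert k v) k dflt = v := by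
    intro d k v dflt
    simp [PySem.Dict.getD, PySem.Dict.get?_insert_self]
  split_ifs with h4 <;> rw [hins] <;> norm_num
  all_goals (rw [pyGet4_none l (by omega)]; rfl)

-- pyGet? never fails on an in-range (possibly negative) index
lemma pyGet?_isSome {α : Type} (xs : List α) (i : Int)
    (h1 : -(xs.length : Int) ≤ i) (h2 : i < (xs.length : Int)) :
    ∃ a, PySem.List.pyGet? xs i = some a := by
  rcases hline : PySem.List.pyGet? xs i with _ | a
  · exfalso
    simp only [PySem.List.pyGet?, PySem.List.pyIdx?] at hline
    split_ifs at hline with h0 hlt hneg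
    all_goals try simp only [Option.bind, List.getElem?_eq_none_iff] at hline
    all_goals omega
  · exact ⟨a, rfl⟩

lemma main_lemma (responses : List String) (overwrite : Bool) :
    ∀ (k : Nat) (index : Int), ((responses.length : Int) - index).toNat ≤ k →
      -(responses.length : Int) ≤ index → index ≤ (responses.length : Int) →
      get_next_response_index responses index overwrite =
        get_next_response_index_alt responses index overwrite := by
  intro k
  induction k with
  | zero =>
    intro index hk h1 h2
    have hidx : index = (responses.length : Int) := by omega
    rw [get_next_response_index, alt_unfold, if_pos hidx, if_pos hidx]
  | succ k ih =>
    intro index hk h1 h2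
    by_cases hidx : index = (responses.length : Int)
    · rw [get_next_response_index, alt_unfold, if_pos hidx, if_pos hidx]
    · obtain ⟨line, hline⟩ := pyGet?_isSome responses index h1 (by omega)
      have hlt : index < (responses.length : Int) := by omega
      rw [get_next_response_index, alt_unfold, if_neg hidx, if_neg hidx]
      split
      · rename_i heq
        rw [hline] at heq
        exact absurd heq (by simp)
      · rename_i line' heq
        rw [hline] at heq
        injection heq with heq
        subst heq
        cases overwrite with
        | true => simp
        | false =>
          simp only [Bool.not_false, if_true, Bool.false_eq_true, if_false, hline,
            Option.getD_some, rating_eq, ne_eq, ite_not]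
          by_cases hrate : (PySem.List.pyGet? (pySplitTab line) 4).getD "" = ""
          · rw [if_pos hrate, if_pos (by simp [hrate])]
          · have hlen : ¬ ((pySplitTab line).length ≤ 4) := by
              intro hle
              exact hrate (by rw [pyGet4_none (pySplitTab line) (by omega)]; rfl)
            rw [if_neg hrate, if_neg (by simp [hlen, hrate])]
            exact ih (index + 1) (by omega) (by omega) (by omega)

-- ===== VERDICT (by name: the statement is the Claim_ definition above) =====
theorem get_next_response_index_spec : Claim_equal_get_next_response_index := by
  intro responses index overwrite _ hpre
  exact main_lemma responses overwrite ((responses.length : Int) - index).toNat index le_rfl hpre.1 hpre.2
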